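-- pv_equiv track=rewrite | github.com/Joacker/Lab_4Cripto | funciones.py | Compactar
-- ===== SOURCE A (Python) =====
-- def Compactar(password):
--     while len(password) > 25:
--         newstring = password[len(password)-2:]
--         password = password[:len(password)-2]
--         num = (ord(newstring[0]) + ord(newstring[1])) % 123
--         if(num < 48):
--             num+=48
--         newLet = chr(num)
--         password += newLet
--     return password
-- ===== SOURCE B (Python) =====
-- def Compactar(password):
--     if len(password) <= 25:
--         return password
--     head = password[:24]
--     tail = password[24:]
--     acc = tail[-1]
--     for c in reversed(tail[:-1]):
--         n = (ord(c) + ord(acc)) % 123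
--         if n < 48:
--             n += 48
--         acc = chr(n)
--     return head + acc
-- ===== Notes on version B (the rewrite author's own statement) =====
-- stated objective: faster
-- what changed: Replaces A's while-loop that re-slices and rebuilds the whole string each iteration with keeping the first 24 characters and a single right-to-left fold over the tail.
import Mathlib
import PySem

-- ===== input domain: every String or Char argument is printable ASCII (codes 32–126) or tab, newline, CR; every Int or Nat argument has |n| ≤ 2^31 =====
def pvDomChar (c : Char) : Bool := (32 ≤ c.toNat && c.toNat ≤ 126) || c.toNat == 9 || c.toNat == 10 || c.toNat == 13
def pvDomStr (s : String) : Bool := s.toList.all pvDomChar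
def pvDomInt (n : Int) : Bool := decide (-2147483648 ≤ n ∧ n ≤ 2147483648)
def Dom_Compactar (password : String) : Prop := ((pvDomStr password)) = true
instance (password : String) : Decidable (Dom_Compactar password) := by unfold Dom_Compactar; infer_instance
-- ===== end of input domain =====

-- B replaces A's quadratic slice-and-reappend while-loop by keeping the first 24
-- characters and doing one right-to-left fold over the tail (objective: faster, asymptotic).

-- ===== PORT A =====
-- A's while-loop: each pass slices off the last two chars and appends their combination.
def CompactarGo (l : List Char) : List Char :=
  if _h : 25 < l.length then
    let newstring := l.drop (l.length - 2)          -- password[len(password)-2:]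
    let p := l.take (l.length - 2)                  -- password[:len(password)-2]
    let num := ((newstring.getD 0 ' ').toNat + (newstring.getD 1 ' ').toNat) % 123
    let num := if num < 48 then num + 48 else num
    CompactarGo (p ++ [Char.ofNat num])             -- password += newLet
  else l
termination_by l.length
decreasing_by simp; omega

def Compactar (password : String) : String := String.mk (CompactarGo password.toList)

-- ===== PORT B =====
def comb (a b : Char) : Char :=
  let n := (a.toNat + b.toNat) % 123
  Char.ofNat (if n < 48 then n + 48 else n)

-- the reversed for-loop with accumulator `acc` starting at tail[-1] is a right fold
def Compactar_alt (password : String) : String :=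
  let l := password.toList
  if l.length ≤ 25 then password
  else
    let head := l.take 24
    let tail := l.drop 24
    String.mk (head ++ [tail.dropLast.foldr comb (tail.getLastD ' ')])

-- ===== PRECONDITION & SPEC =====
def Spec_Compactar (password : String) (out : String) : Prop := out = Compactar_alt password
instance (password : String) (out : String) : Decidable (Spec_Compactar password out) := by unfold Spec_Compactar; infer_instance

-- ===== CLAIM (what is proved, stated in full; the proofs are below) =====
def Claim_equal_Compactar : Prop := ∀ (password : String), Dom_Compactar password → Spec_Compactar password (Compactar password)

-- ===== LEMMAS AND PROOFS =====
def gFold (s : List Char) : Char := s.dropLast.foldr comb (s.getLastD ' ')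

lemma gFold_cons (x : Char) (r : List Char) (h : r ≠ []) :
    gFold (x :: r) = comb x (gFold r) := by
  cases r with
  | nil => contradiction
  | cons y rs =>
    simp [gFold, List.getLastD_eq_getLast?]

lemma gFold_snoc2 (s : List Char) (a b : Char) :
    gFold (s ++ [a, b]) = gFold (s ++ [comb a b]) := by
  induction s with
  | nil => simp [gFold]
  | cons x t ih =>
    rw [List.cons_append, List.cons_append,
        gFold_cons x (t ++ [a, b]) (by simp),
        gFold_cons x (t ++ [comb a b]) (by simp), ih]

lemma go_eq : ∀ (n : ℕ) (l : List Char), l.length = n →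
    CompactarGo l = if l.length ≤ 25 then l
      else l.take 24 ++ [gFold (l.drop 24)] := by
  intro n
  induction n using Nat.strong_induction_on with
  | _ n ih =>
    intro l hl
    by_cases h : l.length ≤ 25
    · rw [CompactarGo]; simp [h]
    · push_neg at h
      -- l = front ++ [a, b]
      have hlen2 : (l.drop (l.length - 2)).length = 2 := by rw [List.length_drop]; omega
      obtain ⟨a, b, hab⟩ : ∃ a b, l.drop (l.length - 2) = [a, b] := by
        match hd : l.drop (l.length - 2) with
        | [a, b] => exact ⟨a, b, rfl⟩
        | [] | [_] | _ :: _ :: _ :: _ => rw [hd] at hlen2 <;> simp at hlen2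
      have hsplit : l = l.take (l.length - 2) ++ [a, b] := by
        rw [← hab, List.take_append_drop]
      have hflen : (l.take (l.length - 2)).length = l.length - 2 := by rw [List.length_take]; omega
      rw [CompactarGo]
      simp only [show ¬ l.length ≤ 25 from by omega, dite_eq_ite, if_pos h, hab]
      simp only [List.getD_cons_zero, List.getD_cons_succ]
      have hcomb : Char.ofNat (if (a.toNat + b.toNat) % 123 < 48
            then (a.toNat + b.toNat) % 123 + 48 else (a.toNat + b.toNat) % 123)
          = comb a b := by simp [comb]
      rw [hcomb]
      set front := l.take (l.length - 2) with hfront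
      have hl' : (front ++ [comb a b]).length = l.length - 1 := by
        simp [hflen]; omega
      rw [ih (l.length - 1) (by omega) _ hl']
      by_cases h26 : l.length = 26
      · -- one step reaches length 25
        have hf24 : front.length = 24 := by omega
        rw [if_pos (by omega)]
        have htake : l.take 24 = front := by
          conv_lhs => rw [hsplit]
          rw [List.take_append_of_le_length (by omega), hfront,
            List.take_take]
          simp [h26]
        have hdrop : l.drop 24 = [a, b] := by
          conv_lhs => rw [hsplit]
          rw [List.drop_append_of_le_length (by omega)]
          simp [hf24]
        rw [htake, hdrop]
        have : front.take 24 = front := by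
          rw [List.take_of_length_le (by omega)]
        simp [gFold]
      · -- still long: both sides fold over the tail
        rw [if_neg (by omega)]
        have hfl : 24 ≤ front.length := by omega
        have htake : (front ++ [comb a b]).take 24 = l.take 24 := by
          conv_rhs => rw [hsplit]
          rw [List.take_append_of_le_length hfl,
              List.take_append_of_le_length hfl]
        have hdropl : l.drop 24 = front.drop 24 ++ [a, b] := by
          conv_lhs => rw [hsplit]
          rw [List.drop_append_of_le_length hfl]
        have hdropl' : (front ++ [comb a b]).drop 24 = front.drop 24 ++ [comb a b] := by
          rw [List.drop_append_of_le_length hfl]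
        rw [htake, hdropl, hdropl', gFold_snoc2]
        simp

lemma mk_toList (s : String) : String.mk s.toList = s := String.ofList_toList

-- ===== VERDICT (by name: the statement is the Claim_ definition above) =====
theorem Compactar_spec : Claim_equal_Compactar := by
  intro password _
  unfold Spec_Compactar Compactar Compactar_alt
  rw [go_eq password.toList.length password.toList rfl]
  by_cases h : password.toList.length ≤ 25
  · rw [if_pos h, if_pos h]; exact mk_toList password
  · rw [if_neg h, if_neg h]; rfl
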